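-- pv_equiv track=rewrite | github.com/S-P-ring/Algorithms | 8/8.6.py | vibor_sort
-- ===== SOURCE A (Python) =====
-- def vibor_sort(array, k):
--     for i in range(0, k):
--         maxpos = i
--         for j in range(i + 1, k):
--             if array[maxpos] > array[j]:
--                 maxpos = j
--         array[i], array[maxpos] = array[maxpos], array[i]
--     return (array)
-- ===== SOURCE B (Python) =====
-- def vibor_sort(array, k):
--     # Insertion sort of the first k elements, in place (same list object returned).
--     prefix = []
--     for i in range(0, k):
--         x = array[i]
--         j = 0
--         while j < len(prefix) and prefix[j] <= x:
--             j += 1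
--         prefix.insert(j, x)
--     array[:len(prefix)] = prefix
--     return array
-- ===== Notes on version B (the rewrite author's own statement) =====
-- stated objective: alternative
-- what changed: Replaced the in-place selection sort of the first k elements by an insertion sort that builds a sorted prefix list and splices it back over array[:k].
import Mathlib
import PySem

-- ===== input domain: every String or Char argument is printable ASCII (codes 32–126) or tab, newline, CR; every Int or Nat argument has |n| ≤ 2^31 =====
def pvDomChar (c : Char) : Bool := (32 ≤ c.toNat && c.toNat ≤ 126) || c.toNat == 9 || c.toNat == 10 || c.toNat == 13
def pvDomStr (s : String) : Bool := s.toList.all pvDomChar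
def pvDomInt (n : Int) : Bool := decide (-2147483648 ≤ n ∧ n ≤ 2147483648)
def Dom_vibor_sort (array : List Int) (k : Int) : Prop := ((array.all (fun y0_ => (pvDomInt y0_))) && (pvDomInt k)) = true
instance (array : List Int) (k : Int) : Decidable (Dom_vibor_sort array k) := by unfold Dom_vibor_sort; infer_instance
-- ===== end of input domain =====

-- B replaces A's in-place selection sort of the first k elements by an insertion sort that
-- builds a sorted prefix list and splices it over array[:k] (an alternative algorithm of the
-- same cost). Like A, B mutates the list argument in place in Python; the mutation is the
-- same and the equivalence proved here is about the return value.


-- ===== PORT A =====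
-- for i in range(0, k): scan j in range(i+1, k) for the position of the minimum; swap.
def vibor_sort (array : List Int) (k : Int) : List Int :=
  (PySem.List.pyRange 0 k 1).foldl (fun arr i =>
    let maxpos := (PySem.List.pyRange (i + 1) k 1).foldl
      (fun maxpos j => if PySem.List.pyGetD arr maxpos 0 > PySem.List.pyGetD arr j 0 then j else maxpos) i
    -- array[i], array[maxpos] = array[maxpos], array[i]
    let vi := PySem.List.pyGetD arr i 0
    let vm := PySem.List.pyGetD arr maxpos 0
    PySem.List.pySetD (PySem.List.pySetD arr i vm) maxpos vi) array

-- ===== PORT B =====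
-- while j < len(prefix) and prefix[j] <= x: j += 1
def findPos (pre : List Int) (x : Int) (j : Nat) : Nat :=
  if h : j < pre.length ∧ pre.getD j 0 ≤ x then findPos pre x (j + 1) else j
termination_by pre.length - j
decreasing_by omega

def vibor_sort_alt (array : List Int) (k : Int) : List Int :=
  let pre := (PySem.List.pyRange 0 k 1).foldl (fun pre i =>
    let x := PySem.List.pyGetD array i 0
    PySem.List.insert pre (findPos pre x 0 : Int) x) []
  -- array[:len(prefix)] = prefix  (slice assignment of equal length)
  pre ++ array.drop pre.length

-- ===== PRECONDITION & SPEC =====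
-- Pre_ excludes exactly k > len(array), on which the Python A raises IndexError.
def Pre_vibor_sort (array : List Int) (k : Int) : Prop := k ≤ (array.length : Int)
instance (array : List Int) (k : Int) : Decidable (Pre_vibor_sort array k) := by unfold Pre_vibor_sort; infer_instance

def pvWitness_vibor_sort : List Int × Int := ([3, 1, 2, 0, 5], 3)

def Spec_vibor_sort (array : List Int) (k : Int) (out : List Int) : Prop := out = vibor_sort_alt array k
instance (array : List Int) (k : Int) (out : List Int) : Decidable (Spec_vibor_sort array k out) := by unfold Spec_vibor_sort; infer_instance

-- ===== CLAIM (what is proved, stated in full; the proofs are below) =====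
def Claim_equal_vibor_sort : Prop := ∀ (array : List Int) (k : Int), Dom_vibor_sort array k → Pre_vibor_sort array k → Spec_vibor_sort array k (vibor_sort array k)

-- ===== LEMMAS AND PROOFS =====

theorem findPos_spec (pre : List Int) (x : Int) (j : Nat) :
    j ≤ pre.length →
    j ≤ findPos pre x j ∧ findPos pre x j ≤ pre.length ∧
    (∀ t, j ≤ t → t < findPos pre x j → pre.getD t 0 ≤ x) ∧
    (findPos pre x j < pre.length → x < pre.getD (findPos pre x j) 0) := by
  fun_induction findPos pre x j with
  | case1 j h ih =>
    intro _
    obtain ⟨ih1, ih2, ih3, ih4⟩ := ih (by omega)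
    refine ⟨by omega, ih2, ?_, ih4⟩
    intro t ht1 ht2
    rcases Nat.eq_or_lt_of_le ht1 with rfl | ht
    · exact h.2
    · exact ih3 t ht ht2
  | case2 j h =>
    intro hj
    refine ⟨le_refl _, hj, by omega, ?_⟩
    intro hlt
    rcases not_and_or.mp h with h1 | h2
    · omega
    · omega

def insStep (pre : List Int) (x : Int) : List Int :=
  PySem.List.insert pre (findPos pre x 0 : Int) x

theorem insStep_sorted (pre : List Int) (x : Int) (hs : pre.Pairwise (· ≤ ·)) :
    (insStep pre x).Pairwise (· ≤ ·) ∧ (insStep pre x).Perm (x :: pre) := by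
  obtain ⟨h1, h2, h3, h4⟩ := findPos_spec pre x 0 (by omega)
  set p := findPos pre x 0 with hp
  have hins : insStep pre x = pre.take p ++ x :: pre.drop p := by
    rw [insStep, ← hp, PySem.List.insert_natCast pre p x h2]
  constructor
  · rw [hins]
    rw [List.pairwise_append]
    refine ⟨hs.sublist (List.take_sublist _ _), ?_, ?_⟩
    · -- x :: drop p pairwise
      rw [List.pairwise_cons]
      refine ⟨?_, hs.sublist (List.drop_sublist _ _)⟩
      intro b hb
      obtain ⟨u, hu, rfl⟩ := List.getElem_of_mem hb
      have hud : u < pre.length - p := by simpa using hu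
      have hplen : p < pre.length := by omega
      rw [List.getElem_drop]
      have hxp : x < pre.getD p 0 := h4 hplen
      have hmono : pre.getD p 0 ≤ pre[p + u]'(by omega) := by
        rcases Nat.eq_zero_or_pos u with rfl | hu0
        · simp [List.getD_eq_getElem?_getD, List.getElem?_eq_getElem hplen]
        · have := List.pairwise_iff_getElem.mp hs p (p + u) hplen (by omega) (by omega)
          simpa [List.getD_eq_getElem?_getD, List.getElem?_eq_getElem hplen] using this
      omega
    · -- take ≤ x :: drop
      intro a ha b hb
      obtain ⟨u, hu, rfl⟩ := List.getElem_of_mem ha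
      have hulen : u < pre.length := by simp at hu; omega
      have hup : u < p := by simp at hu; omega
      have hax : pre[u] ≤ x := by
        have := h3 u (by omega) (by simpa [List.getElem_take] using hup)
        simpa [List.getD_eq_getElem?_getD, List.getElem?_eq_getElem hulen, List.getElem_take] using this
      rw [List.getElem_take]
      rcases List.mem_cons.mp hb with rfl | hbd
      · exact hax
      · obtain ⟨v, hv, rfl⟩ := List.getElem_of_mem hbd
        rw [List.getElem_drop]
        have hvlen : p + v < pre.length := by simp at hv; omega
        have : pre[u] ≤ pre[p + v] := by
          exact List.pairwise_iff_getElem.mp hs u (p + v) (by omega) hvlen (by omega)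
        exact this
  · rw [hins]
    have := List.perm_middle (a := x) (l₁ := pre.take p) (l₂ := pre.drop p)
    simpa [List.take_append_drop] using this

theorem foldl_insStep (l : List Int) :
    ∀ init : List Int, init.Pairwise (· ≤ ·) →
    (l.foldl insStep init).Pairwise (· ≤ ·) ∧ (l.foldl insStep init).Perm (init ++ l) := by
  induction l with
  | nil => intro init h; simpa using h
  | cons v t ih =>
    intro init h
    obtain ⟨hs, hperm⟩ := insStep_sorted init v h
    obtain ⟨ihs, ihperm⟩ := ih (insStep init v) hs
    refine ⟨by simpa using ihs, ?_⟩
    have h2 : (insStep init v ++ t).Perm (init ++ v :: t) :=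
      (hperm.append_right t).trans (List.perm_middle).symm
    simpa using ihperm.trans h2

theorem alt_char (array : List Int) (k : Int) (hk0 : 0 ≤ k) (hk : k ≤ (array.length : Int)) :
    vibor_sort_alt array k = (array.take k.toNat).foldl insStep [] ++ array.drop k.toNat := by
  have hlen : ((array.take k.toNat).length : Int) = k := by
    simp [List.length_take]; omega
  have hfold : (PySem.List.pyRange 0 k 1).foldl (fun pre i =>
      let x := PySem.List.pyGetD array i 0
      PySem.List.insert pre (findPos pre x 0 : Int) x) [] = (array.take k.toNat).foldl insStep [] := by
    have hr : PySem.List.pyRange 0 k 1 = PySem.List.pyRange 0 ((array.take k.toNat).length : Int) 1 := by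
      rw [hlen]
    rw [hr]
    rw [PySem.List.foldl_congr_mem (g := fun pre i => insStep pre (PySem.List.pyGetD (array.take k.toNat) i 0))]
    · exact PySem.List.foldl_pyRange_zero_pyGetD' (array.take k.toNat) 0 insStep []
    · intro acc x hx
      rw [hlen] at hx
      have hmem := PySem.List.mem_pyRange_one.mp hx
      have hx0 : 0 ≤ x := by omega
      have hxk : x < k := by omega
      have : PySem.List.pyGetD array x 0 = PySem.List.pyGetD (array.take k.toNat) x 0 := by
        rw [PySem.List.pyGetD_eq_getElem array 0 hx0 (by omega),
            PySem.List.pyGetD_eq_getElem (array.take k.toNat) 0 hx0 (by simp [List.length_take]; omega)]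
        simp [List.getElem_take]
      simp only [insStep, this]
  have hplen : ((array.take k.toNat).foldl insStep []).length = k.toNat := by
    have := (foldl_insStep (array.take k.toNat) [] (by simp)).2
    have hl := this.length_eq
    simp [List.length_take] at hl ⊢
    omega
  rw [vibor_sort_alt]
  simp only [hfold, hplen]

theorem argmin_fold (f : Int → Int) (b : Int) :
    ∀ (a m0 : Int),
    (((PySem.List.pyRange a b 1).foldl (fun mp j => if f mp > f j then j else mp) m0) = m0 ∨
      (a ≤ ((PySem.List.pyRange a b 1).foldl (fun mp j => if f mp > f j then j else mp) m0) ∧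
       ((PySem.List.pyRange a b 1).foldl (fun mp j => if f mp > f j then j else mp) m0) < b)) ∧
    f ((PySem.List.pyRange a b 1).foldl (fun mp j => if f mp > f j then j else mp) m0) ≤ f m0 ∧
    (∀ j, a ≤ j → j < b → f ((PySem.List.pyRange a b 1).foldl (fun mp j => if f mp > f j then j else mp) m0) ≤ f j) := by
  intro a m0
  by_cases hab : b ≤ a
  · rw [PySem.List.pyRange_one_eq_nil hab]
    exact ⟨Or.inl rfl, le_refl _, by omega⟩
  · push_neg at hab
    have hsize : ((b - (a+1)).toNat) < ((b - a).toNat) := by omega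
    rw [PySem.List.pyRange_one_cons hab, List.foldl_cons]
    set m1 := if f m0 > f a then a else m0 with hm1
    obtain ⟨ih1, ih2, ih3⟩ := argmin_fold f b (a + 1) m1
    set r := (PySem.List.pyRange (a+1) b 1).foldl (fun mp j => if f mp > f j then j else mp) m1 with hr
    have hm1f : f m1 ≤ f m0 ∧ (m1 = m0 ∨ m1 = a) := by
      rw [hm1]; split_ifs with h
      · exact ⟨by omega, Or.inr rfl⟩
      · exact ⟨le_refl _, Or.inl rfl⟩
    have hm1a : f m1 ≤ f a := by
      rw [hm1]; split_ifs with h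
      · exact le_refl _
      · omega
    refine ⟨?_, le_trans ih2 hm1f.1, ?_⟩
    · rcases ih1 with h | h
      · rcases hm1f.2 with h2 | h2
        · exact Or.inl (h.trans h2)
        · exact Or.inr (by omega)
      · exact Or.inr (by omega)
    · intro j hj1 hj2
      rcases eq_or_lt_of_le hj1 with rfl | hj
      · exact le_trans ih2 hm1a
      · exact ih3 j (by omega) hj2
termination_by a m0 => (b - a).toNat
decreasing_by omega

theorem getD_set (l : List Int) (p : Nat) (v : Int) (hp : p < l.length) (t : Nat) :
    (l.set p v).getD t 0 = if t = p then v else l.getD t 0 := by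
  by_cases h : t = p
  · subst h
    simp [List.getD_eq_getElem?_getD, hp]
  · simp [List.getD_eq_getElem?_getD, List.getElem?_set_ne (by omega : p ≠ t), h]

theorem take_set (l : List Int) (n p : Nat) (v : Int) (hp : p < n) :
    (l.set p v).take n = (l.take n).set p v := by
  apply List.ext_getElem
  · simp
  · intro i h1 h2
    simp [List.getElem_take, List.getElem_set]

theorem cons_set_perm {α : Type} (t : List α) (q : Nat) (x : α) (hq : q < t.length) :
    (t[q] :: t.set q x).Perm (x :: t) := by
  induction t generalizing q with
  | nil => simp at hq
  | cons y s ih =>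
    cases q with
    | zero => simpa using List.Perm.swap x y s
    | succ s' =>
      have h' : s' < s.length := by simpa using hq
      have e : (y :: s)[s' + 1] :: (y :: s).set (s' + 1) x = s[s'] :: y :: s.set s' x := by simp
      rw [e]
      exact ((List.Perm.swap _ _ _).trans ((ih s' h').cons y)).trans (List.Perm.swap _ _ _)

theorem set_set_perm {α : Type} (l : List α) (p q : Nat) (hp : p < l.length) (hq : q < l.length) :
    ((l.set p l[q]).set q l[p]).Perm l := by
  induction l generalizing p q with
  | nil => simp at hp
  | cons y s ih =>
    cases p with
    | zero =>
      cases q with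
      | zero => simp
      | succ s' =>
        have h' : s' < s.length := by simpa using hq
        simpa using cons_set_perm s s' y h'
    | succ r =>
      cases q with
      | zero =>
        have h' : r < s.length := by simpa using hp
        simpa using cons_set_perm s r y h'
      | succ s' =>
        have h1 : r < s.length := by simpa using hp
        have h2 : s' < s.length := by simpa using hq
        simpa using (ih r s' h1 h2).cons y

def selStep (k : Int) (arr : List Int) (i : Int) : List Int :=
  let maxpos := (PySem.List.pyRange (i + 1) k 1).foldl
    (fun maxpos j => if PySem.List.pyGetD arr maxpos 0 > PySem.List.pyGetD arr j 0 then j else maxpos) i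
  let vi := PySem.List.pyGetD arr i 0
  let vm := PySem.List.pyGetD arr maxpos 0
  PySem.List.pySetD (PySem.List.pySetD arr i vm) maxpos vi

def SelInv (array arr : List Int) (n i : Nat) : Prop :=
  arr.length = array.length ∧
  (∀ t : Nat, n ≤ t → arr.getD t 0 = array.getD t 0) ∧
  (arr.take n).Perm (array.take n) ∧
  (∀ p q : Nat, p < i → p < q → q < n → arr.getD p 0 ≤ arr.getD q 0)

theorem selStep_inv (array : List Int) (n : Nat) (hn : n ≤ array.length)
    (i : Nat) (hi : i < n) (arr : List Int) (h : SelInv array arr n i) :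
    SelInv array (selStep (n : Int) arr (i : Int)) n (i + 1) := by
  obtain ⟨hlen, hsuf, hperm, hord⟩ := h
  have hln : n ≤ arr.length := by omega
  obtain ⟨h1, h2, h3⟩ := argmin_fold (fun j => PySem.List.pyGetD arr j 0) (n : Int) ((i : Int) + 1) (i : Int)
  set m := (PySem.List.pyRange ((i : Int) + 1) (n : Int) 1).foldl
    (fun mp j => if PySem.List.pyGetD arr mp 0 > PySem.List.pyGetD arr j 0 then j else mp) (i : Int) with hm
  have hmr : (i : Int) ≤ m ∧ m < (n : Int) := by
    rcases h1 with h | h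
    · constructor <;> omega
    · constructor <;> omega
  set m' := m.toNat with hm'
  have hmcast : m = (m' : Int) := by omega
  have hmn : m' < n := by omega
  have hgd : ∀ j : Nat, PySem.List.pyGetD arr (j : Int) 0 = arr.getD j 0 := fun j =>
    PySem.List.pyGetD_natCast arr j 0
  have hminD : ∀ j : Nat, i ≤ j → j < n → arr.getD m' 0 ≤ arr.getD j 0 := by
    intro j hj1 hj2
    rcases Nat.eq_or_lt_of_le hj1 with rfl | hj
    · rw [← hgd, ← hgd, ← hmcast]; exact h2
    · rw [← hgd, ← hgd, ← hmcast]; exact h3 (j : Int) (by omega) (by omega)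
  have hstep : selStep (n : Int) arr (i : Int) =
      (arr.set i (arr.getD m' 0)).set m' (arr.getD i 0) := by
    rw [selStep]
    simp only [← hm]
    rw [hmcast, PySem.List.pyGetD_natCast, PySem.List.pyGetD_natCast,
      PySem.List.pySetD_natCast, PySem.List.pySetD_natCast]
  rw [hstep]
  have hA : ∀ t : Nat, ((arr.set i (arr.getD m' 0)).set m' (arr.getD i 0)).getD t 0 =
      if t = m' then arr.getD i 0 else if t = i then arr.getD m' 0 else arr.getD t 0 := by
    intro t
    rw [getD_set _ m' _ (by simp; omega) t, getD_set _ i _ (by omega) t]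
  refine ⟨by simp [hlen], ?_, ?_, ?_⟩
  · intro t ht
    rw [hA t, if_neg (by omega), if_neg (by omega)]
    exact hsuf t ht
  · have hv1 : arr.getD m' 0 = (arr.take n)[m']'(by simp; omega) := by
      rw [List.getElem_take]
      exact List.getD_eq_getElem arr 0 (by omega)
    have hv2 : arr.getD i 0 = (arr.take n)[i]'(by simp; omega) := by
      rw [List.getElem_take]
      exact List.getD_eq_getElem arr 0 (by omega)
    have htk : ((arr.set i (arr.getD m' 0)).set m' (arr.getD i 0)).take n =
        ((arr.take n).set i ((arr.take n)[m']'(by simp; omega))).set m'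
          ((arr.take n)[i]'(by simp; omega)) := by
      rw [take_set _ n m' _ hmn, take_set _ n i _ hi, hv1, hv2]
    rw [htk]
    exact (set_set_perm (arr.take n) i m' (by simp; omega) (by simp; omega)).trans hperm
  · intro p q hp hpq hq
    rw [hA p, hA q]
    have hpi : p ≤ i := by omega
    by_cases hpm : p = m'
    · -- p = m' ≥ i and p ≤ i ⇒ p = i = m'
      have : p = i := by omega
      subst this
      rw [if_pos hpm]
      by_cases hqm : q = m'
      · omega
      · rw [if_neg hqm, if_neg (by omega)]
        rw [hpm]
        exact hminD q (by omega) hq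
    · rw [if_neg hpm]
      by_cases hpi' : p = i
      · subst hpi'
        rw [if_pos rfl]
        by_cases hqm : q = m'
        · rw [if_pos hqm]
          exact hminD p le_rfl (by omega)
        · rw [if_neg hqm, if_neg (by omega)]
          exact hminD q (by omega) hq
      · have hplt : p < i := by omega
        rw [if_neg hpi']
        by_cases hqm : q = m'
        · rw [if_pos hqm]
          exact hord p i hplt hplt (by omega)
        · rw [if_neg hqm]
          by_cases hqi : q = i
          · rw [if_pos hqi]
            exact hord p m' hplt (by omega) hmn
          · rw [if_neg hqi]
            exact hord p q hplt hpq hq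

theorem sel_loop_inv (array : List Int) (n : Nat) (hn : n ≤ array.length) :
    ∀ i : Nat, i ≤ n →
    SelInv array ((List.range i).foldl (fun (arr : List Int) (t : Nat) => selStep (n : Int) arr (t : Int)) array) n i := by
  intro i
  induction i with
  | zero =>
    intro _
    exact ⟨rfl, fun t _ => rfl, List.Perm.refl _, by omega⟩
  | succ i ih =>
    intro hi
    rw [List.range_succ]
    rw [List.foldl_append]
    rw [List.foldl_cons, List.foldl_nil]
    exact selStep_inv array n hn i (by omega) _ (ih (by omega))


theorem a_repr (array : List Int) (n : Nat) :
    vibor_sort array (n : Int) =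
      (List.range n).foldl (fun (arr : List Int) (t : Nat) => selStep (n : Int) arr (t : Int)) array := by
  rw [vibor_sort, PySem.List.pyRange_zero_natCast, List.foldl_map]
  rfl

theorem vibor_sort_main (array : List Int) (k : Int) (hk : k ≤ (array.length : Int)) :
    vibor_sort array k = vibor_sort_alt array k := by
  rcases lt_or_ge k 0 with hneg | hpos
  · rw [vibor_sort, vibor_sort_alt, PySem.List.pyRange_one_eq_nil (by omega)]
    simp
  · set n := k.toNat with hn'
    have hkn : k = (n : Int) := by omega
    have hn : n ≤ array.length := by omega
    rw [hkn]
    obtain ⟨hlen, hsuf, hperm, hord⟩ := sel_loop_inv array n hn n le_rfl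
    set arrF := (List.range n).foldl (fun (arr : List Int) (t : Nat) => selStep (n : Int) arr (t : Int)) array with harrF
    set S := (array.take n).foldl insStep [] with hS
    obtain ⟨hSsorted, hSperm⟩ := foldl_insStep (array.take n) [] (by simp)
    have haltn : vibor_sort_alt array (n : Int) = S ++ array.drop n := by
      have := alt_char array (n : Int) (by omega) (by omega)
      simpa using this
    have hFsorted : (arrF.take n).Pairwise (· ≤ ·) := by
      rw [List.pairwise_iff_getElem]
      intro p q hp hq hpq
      have hlt : (arrF.take n).length = n := by simp [List.length_take]; omega
      rw [hlt] at hp hq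
      rw [List.getElem_take, List.getElem_take]
      rw [← List.getD_eq_getElem arrF 0 (by omega), ← List.getD_eq_getElem arrF 0 (by omega)]
      exact hord p q hp hpq hq
    have hdrop : arrF.drop n = array.drop n := by
      apply List.ext_getElem
      · simp [hlen]
      · intro t h1 h2
        rw [List.getElem_drop, List.getElem_drop]
        rw [← List.getD_eq_getElem arrF 0 (by simp at h1; omega),
            ← List.getD_eq_getElem array 0 (by simp at h2; omega)]
        exact hsuf (n + t) (by omega)
    have e1 : PySem.List.sorted (array.take n) (fun x => x) = S :=
      PySem.List.sorted_id_eq_of_perm_of_pairwise _ _ (by simpa using hSperm) hSsorted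
    have e2 : PySem.List.sorted (array.take n) (fun x => x) = arrF.take n :=
      PySem.List.sorted_id_eq_of_perm_of_pairwise _ _ hperm hFsorted
    rw [a_repr array n, ← harrF, ← List.take_append_drop n arrF, hdrop, ← e2, e1, haltn]

-- ===== VERDICT (by name: the statement is the Claim_ definition above) =====
theorem vibor_sort_spec : Claim_equal_vibor_sort := by
  intro array k _ hpre
  unfold Spec_vibor_sort
  exact vibor_sort_main array k hpre
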